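-- pv_equiv track=rewrite | github.com/GTseq/gtseq_microhap | gtseq_microhap_catalog_and_call.py | _gaps_per_boundary
-- ===== SOURCE A (Python) =====
-- def _gaps_per_boundary(gapped_ref: str, ref_len: int):
--     """
--     Given an alignment string for the reference with '-' gaps, compute how many
--     gaps occur at each boundary between reference bases.
--     Returns list length ref_len+1: gaps before base0, between bases, after last base.
--     """
--     gaps = [0] * (ref_len + 1)
--     ref_i = 0
--     # leading gaps are boundary 0
--     k = 0
--     while k < len(gapped_ref) and gapped_ref[k] == '-':
--         gaps[0] += 1
--         k += 1
--     # now parse columns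
--     current_boundary = 0
--     while k < len(gapped_ref):
--         c = gapped_ref[k]
--         if c == '-':
--             # gaps before next ref base (or trailing)
--             if ref_i <= ref_len:
--                 gaps[ref_i] += 1
--         else:
--             ref_i += 1
--         k += 1
--     # trailing gaps are already counted into gaps[ref_len] by the loop above
--     return gaps
-- ===== SOURCE B (Python) =====
-- def _gaps_per_boundary(gapped_ref: str, ref_len: int):
--     """Run-length version: one pass over maximal runs of gap / non-gap columns."""
--     gaps = [0] * (ref_len + 1)
--     ref_i = 0
--     k = 0
--     n = len(gapped_ref)
--     while k < n:
--         first_is_gap = gapped_ref[k] == '-'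
--         j = k
--         while j < n and (gapped_ref[j] == '-') == first_is_gap:
--             j += 1
--         if first_is_gap:
--             if ref_i <= ref_len:
--                 gaps[ref_i] += j - k
--         else:
--             ref_i += j - k
--         k = j
--     return gaps
-- ===== Notes on version B (the rewrite author's own statement) =====
-- stated objective: faster
-- what changed: Replaces A's separate leading-gap loop plus char-at-a-time scan (one indexed list update per gap column) with a single pass over maximal runs of gap/non-gap columns that adds each whole gap run to its boundary at once.
import Mathlib
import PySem

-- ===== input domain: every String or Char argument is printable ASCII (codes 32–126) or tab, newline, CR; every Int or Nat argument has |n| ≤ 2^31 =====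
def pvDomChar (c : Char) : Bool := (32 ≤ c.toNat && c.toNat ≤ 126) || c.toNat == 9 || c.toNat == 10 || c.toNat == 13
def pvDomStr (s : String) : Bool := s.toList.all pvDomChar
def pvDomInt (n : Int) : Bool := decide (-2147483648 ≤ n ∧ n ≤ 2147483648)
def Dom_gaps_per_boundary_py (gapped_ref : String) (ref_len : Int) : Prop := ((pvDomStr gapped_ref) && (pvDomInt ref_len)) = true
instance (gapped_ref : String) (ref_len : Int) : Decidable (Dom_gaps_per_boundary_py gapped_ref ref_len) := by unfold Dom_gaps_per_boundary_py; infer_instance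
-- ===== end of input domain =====

-- B replaces A's leading-gap loop + char-at-a-time scan by a single pass over
-- maximal runs of gap / non-gap columns, updating each boundary once per run
-- (objective: faster by a constant factor, measured).

-- ===== PORT A =====
-- A's first while loop: consume leading '-' chars, each incrementing gaps[0].
def pvALead (cs : List Char) (gaps : List Int) : List Char × List Int :=
  match cs with
  | [] => ([], gaps)
  | c :: rest =>
    if c = '-' then pvALead rest (gaps.set 0 (gaps.getD 0 0 + 1))
    else (c :: rest, gaps)

-- A's second while loop over the remaining columns.
def pvAScan (L : Int) (cs : List Char) (gaps : List Int) (ref_i : Int) : List Int :=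
  match cs with
  | [] => gaps
  | c :: rest =>
    if c = '-' then
      if ref_i ≤ L then
        pvAScan L rest (gaps.set ref_i.toNat (gaps.getD ref_i.toNat 0 + 1)) ref_i
      else pvAScan L rest gaps ref_i
    else pvAScan L rest gaps (ref_i + 1)

def gaps_per_boundary_py (gapped_ref : String) (ref_len : Int) : List Int :=
  pvAScan ref_len (pvALead gapped_ref.toList (List.replicate (ref_len + 1).toNat 0)).1
    (pvALead gapped_ref.toList (List.replicate (ref_len + 1).toNat 0)).2 0

-- ===== PORT B =====
-- Source B's outer loop: each iteration consumes one maximal run of equal gap-ness.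
def pvBRuns (L : Int) (cs : List Char) (gaps : List Int) (ref_i : Int) : List Int :=
  match cs with
  | [] => gaps
  | c :: rest =>
    let run := rest.takeWhile (fun d => ((d = '-') : Bool) = ((c = '-') : Bool))
    let rest' := rest.dropWhile (fun d => ((d = '-') : Bool) = ((c = '-') : Bool))
    let n : Int := (run.length : Int) + 1
    if c = '-' then
      pvBRuns L rest'
        (if ref_i ≤ L then gaps.set ref_i.toNat (gaps.getD ref_i.toNat 0 + n) else gaps)
        ref_i
    else pvBRuns L rest' gaps (ref_i + n)
termination_by cs.length
decreasing_by
  all_goals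
    simp only [List.length_cons]
    exact Nat.lt_succ_of_le (List.length_dropWhile_le _ _)

def gaps_per_boundary_py_alt (gapped_ref : String) (ref_len : Int) : List Int :=
  pvBRuns ref_len gapped_ref.toList (List.replicate (ref_len + 1).toNat 0) 0

-- ===== PRECONDITION & SPEC =====
-- Pre_ excludes exactly the inputs where A raises IndexError:
-- ref_len < 0 (so gaps = []) together with a leading '-' column.
def Pre_gaps_per_boundary_py (gapped_ref : String) (ref_len : Int) : Prop :=
  0 ≤ ref_len ∨ ¬ gapped_ref.toList.head? = some '-'
instance (gapped_ref : String) (ref_len : Int) : Decidable (Pre_gaps_per_boundary_py gapped_ref ref_len) := by unfold Pre_gaps_per_boundary_py; infer_instance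

def pvWitness_gaps_per_boundary_py : String × Int := ("--A-G", 2)

def Spec_gaps_per_boundary_py (gapped_ref : String) (ref_len : Int) (out : List Int) : Prop := out = gaps_per_boundary_py_alt gapped_ref ref_len
instance (gapped_ref : String) (ref_len : Int) (out : List Int) : Decidable (Spec_gaps_per_boundary_py gapped_ref ref_len out) := by unfold Spec_gaps_per_boundary_py; infer_instance

-- ===== CLAIM (what is proved, stated in full; the proofs are below) =====
def Claim_equal_gaps_per_boundary_py : Prop := ∀ (gapped_ref : String) (ref_len : Int), Dom_gaps_per_boundary_py gapped_ref ref_len → Pre_gaps_per_boundary_py gapped_ref ref_len → Spec_gaps_per_boundary_py gapped_ref ref_len (gaps_per_boundary_py gapped_ref ref_len)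
-- ===== LEMMAS AND PROOFS =====

-- adding twice at the same index = adding the sum (also when the index is out of range)
theorem pv_set_add_add (g : List Int) (i : Nat) (a b : Int) :
    ((g.set i (g.getD i 0 + a)).set i ((g.set i (g.getD i 0 + a)).getD i 0 + b))
      = g.set i (g.getD i 0 + (a + b)) := by
  by_cases h : i < g.length
  · simp [List.getD, h]
    congr 1
    omega
  · have h1 : g.length ≤ i := by omega
    simp [List.set_eq_of_length_le h1]

theorem pv_set_getD_self (g : List Int) (i : Nat) :
    g.set i (g.getD i 0) = g := by
  by_cases h : i < g.length
  · simp [List.getD, List.getElem?_eq_getElem h, List.set_getElem_self]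
  · rw [List.set_eq_of_length_le (by omega)]

-- A's scan over a run of gap columns, as one block update
theorem pv_scan_gap_run (L : Int) (run rest : List Char) (hrun : ∀ d ∈ run, d = '-')
    (g : List Int) (i : Int) :
    pvAScan L (run ++ rest) g i
      = pvAScan L rest
          (if i ≤ L then g.set i.toNat (g.getD i.toNat 0 + (run.length : Int)) else g) i := by
  induction run generalizing g with
  | nil =>
    split_ifs with hi
    · simp only [List.nil_append, List.length_nil, Nat.cast_zero, add_zero, pv_set_getD_self]
    · simp
  | cons c cs ih =>
    have hc : c = '-' := hrun c (by simp)
    have hcs : ∀ d ∈ cs, d = '-' := fun d hd => hrun d (by simp [hd])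
    by_cases hi : i ≤ L
    · simp only [List.cons_append, pvAScan]
      rw [if_pos hc, if_pos hi, ih hcs, if_pos hi, if_pos hi, pv_set_add_add]
      have hv : g.getD i.toNat 0 + (1 + (cs.length : Int))
          = g.getD i.toNat 0 + (((c :: cs).length : Nat) : Int) := by
        simp only [List.length_cons]; push_cast; ring
      rw [hv]
    · simp only [List.cons_append, pvAScan]
      rw [if_pos hc, if_neg hi, ih hcs, if_neg hi, if_neg hi]

-- A's scan over a run of non-gap columns: only ref_i advances
theorem pv_scan_base_run (L : Int) (run rest : List Char) (hrun : ∀ d ∈ run, d ≠ '-')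
    (g : List Int) (i : Int) :
    pvAScan L (run ++ rest) g i = pvAScan L rest g (i + (run.length : Int)) := by
  induction run generalizing i with
  | nil => simp
  | cons c cs ih =>
    have hc : c ≠ '-' := hrun c (by simp)
    have hcs : ∀ d ∈ cs, d ≠ '-' := fun d hd => hrun d (by simp [hd])
    simp only [List.cons_append, pvAScan]
    rw [if_neg hc, ih hcs]
    congr 1
    simp only [List.length_cons]
    push_cast
    ring

-- the single run pass of B equals A's char-at-a-time scan, for every state
theorem pv_runs_eq_scan (L : Int) (cs : List Char) (g : List Int) (i : Int) :
    pvBRuns L cs g i = pvAScan L cs g i := by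
  match cs with
  | [] => simp [pvBRuns, pvAScan]
  | c :: rest =>
    rw [pvBRuns]
    set p := fun d => (((d = '-') : Bool) = ((c = '-') : Bool) : Bool) with hp
    have hsplit : rest.takeWhile p ++ rest.dropWhile p = rest :=
      List.takeWhile_append_dropWhile
    have hlen : (rest.dropWhile p).length < (c :: rest).length := by
      simp only [List.length_cons]
      exact Nat.lt_succ_of_le (List.length_dropWhile_le _ _)
    by_cases hc : c = '-'
    · have htake : ∀ d ∈ rest.takeWhile p, d = '-' := by
        intro d hd
        have := List.mem_takeWhile_imp hd
        simp [hp, hc] at this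
        exact this
      rw [if_pos hc, pv_runs_eq_scan L (rest.dropWhile p) _ i]
      conv_rhs => rw [show (c :: rest) = (c :: rest.takeWhile p) ++ rest.dropWhile p by
        simp [hsplit]]
      rw [pv_scan_gap_run L (c :: rest.takeWhile p) (rest.dropWhile p)
            (fun d hd => by
              rcases List.mem_cons.mp hd with h | h
              · exact h.trans hc
              · exact htake d h) g i]
      congr 2
    · have htake : ∀ d ∈ rest.takeWhile p, d ≠ '-' := by
        intro d hd
        have := List.mem_takeWhile_imp hd
        simp [hp, hc] at this
        exact this
      rw [if_neg hc, pv_runs_eq_scan L (rest.dropWhile p) _ _]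
      conv_rhs => rw [show (c :: rest) = (c :: rest.takeWhile p) ++ rest.dropWhile p by
        simp [hsplit]]
      rw [pv_scan_base_run L (c :: rest.takeWhile p) (rest.dropWhile p)
            (fun d hd => by
              rcases List.mem_cons.mp hd with h | h
              · exact fun h' => hc (h ▸ h')
              · exact htake d h) g i]
      congr 1
termination_by cs.length
decreasing_by
  all_goals first
    | exact List.length_dropWhile_le _ _
    | (simp only [List.length_cons]
       exact Nat.lt_succ_of_le (List.length_dropWhile_le _ _))

-- when 0 ≤ L, A's leading-gap loop does exactly what the scan would do at ref_i = 0
theorem pv_lead_eq_scan (L : Int) (hL : 0 ≤ L) (cs : List Char) (g : List Int) :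
    pvAScan L (pvALead cs g).1 (pvALead cs g).2 0 = pvAScan L cs g 0 := by
  induction cs generalizing g with
  | nil => simp [pvALead]
  | cons c rest ih =>
    by_cases hc : c = '-'
    · simp only [pvALead]
      rw [if_pos hc, ih]
      simp only [pvAScan]
      rw [if_pos hc, if_pos hL]
      simp [Int.toNat_zero]
    · simp [pvALead, hc]

-- ===== VERDICT (by name: the statement is the Claim_ definition above) =====
theorem gaps_per_boundary_py_spec : Claim_equal_gaps_per_boundary_py := by
  intro s L _ hpre
  unfold Spec_gaps_per_boundary_py gaps_per_boundary_py gaps_per_boundary_py_alt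
  rw [pv_runs_eq_scan]
  rcases hpre with hL | hhead
  · exact pv_lead_eq_scan L hL s.toList _
  · match h : s.toList with
    | [] => simp [pvALead]
    | c :: rest =>
      have hc : c ≠ '-' := fun hc' => hhead (by simp [h, hc'])
      simp [pvALead, hc]
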